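-- pv_equiv track=rewrite | github.com/kimdy003/Python_study | Programmers/level_3/40_숫자 게임.py | solution
-- ===== SOURCE A (Python) =====
-- def solution(A, B):
--     answer = 0
--     A = sorted(A, reverse=True)
--     B = sorted(B, reverse=True)
--
--     for a in A:
--         Min = a
--         for b in B:
--             if Min < b:
--                 Min = b
--             else:
--                 break
--         if Min == a:
--             continue
--         else:
--             B.remove(Min)
--             answer+=1
--
--     return answer
-- ===== SOURCE B (Python) =====
-- def solution(A, B):
--     Bs = sorted(B, reverse=True)
--     j = 0
--     for a in sorted(A, reverse=True):
--         if j < len(Bs) and Bs[j] > a: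
--             j += 1
--     return j
-- ===== Notes on version B (the rewrite author's own statement) =====
-- stated objective: faster
-- what changed: Replaces the per-element inner scan of B and the O(n) B.remove() with a single index pointer into the sorted list, so B is never mutated and each element is examined once.
import Mathlib
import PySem

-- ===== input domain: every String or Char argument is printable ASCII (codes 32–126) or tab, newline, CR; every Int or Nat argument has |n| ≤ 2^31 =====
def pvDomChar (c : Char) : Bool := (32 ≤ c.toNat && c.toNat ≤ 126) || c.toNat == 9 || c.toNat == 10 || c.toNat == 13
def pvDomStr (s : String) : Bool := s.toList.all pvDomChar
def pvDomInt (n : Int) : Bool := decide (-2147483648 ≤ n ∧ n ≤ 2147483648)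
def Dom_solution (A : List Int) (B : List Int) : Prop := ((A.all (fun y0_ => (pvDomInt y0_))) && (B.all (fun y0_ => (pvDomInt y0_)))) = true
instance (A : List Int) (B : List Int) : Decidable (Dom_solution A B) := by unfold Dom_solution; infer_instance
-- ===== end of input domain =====

-- B replaces A's per-element inner scan of B and O(n) list remove with a single index
-- pointer into the sorted list (no mutation); return value is equal on all inputs.

-- ===== PORT A =====
-- inner 'for b in B: if Min < b: Min = b else: break'
def pvInner (Min : Int) : List Int → Int
  | [] => Min
  | b :: rest => if Min < b then pvInner b rest else Min

-- one outer-loop step on state (answer, current B list)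
def pvStepA (st : Int × List Int) (a : Int) : Int × List Int :=
  let Min := pvInner a st.2
  if Min = a then st
  else (st.1 + 1, (PySem.List.remove? st.2 Min).getD st.2)
  -- remove? is some whenever reached (Min ∈ B then); getD only totalises

def solution (A : List Int) (B : List Int) : Int :=
  let As := PySem.List.sorted A (fun x => x) true
  let Bs := PySem.List.sorted B (fun x => x) true
  (As.foldl pvStepA (0, Bs)).1

-- ===== PORT B =====
def pvStepB (Bs : List Int) (j : Int) (a : Int) : Int :=
  if j < (Bs.length : Int) ∧ (PySem.List.pyGet? Bs j).getD a > a then j + 1 else j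

def solution_alt (A : List Int) (B : List Int) : Int :=
  let Bs := PySem.List.sorted B (fun x => x) true
  (PySem.List.sorted A (fun x => x) true).foldl (pvStepB Bs) 0

-- ===== PRECONDITION & SPEC =====
def Spec_solution (A : List Int) (B : List Int) (out : Int) : Prop := out = solution_alt A B
instance (A : List Int) (B : List Int) (out : Int) : Decidable (Spec_solution A B out) := by unfold Spec_solution; infer_instance

-- ===== CLAIM (what is proved, stated in full; the proofs are below) =====
def Claim_equal_solution : Prop := ∀ (A : List Int) (B : List Int), Dom_solution A B → Spec_solution A B (solution A B)

-- ===== LEMMAS AND PROOFS =====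

-- the inner loop on a descending list returns max(a, head)
lemma pvInner_sorted (a b : Int) (rest : List Int)
    (h : (b :: rest).Pairwise (fun x y => y ≤ x)) :
    pvInner a (b :: rest) = if a < b then b else a := by
  cases rest with
  | nil => simp [pvInner]
  | cons c t =>
      have hcb : c ≤ b := (List.pairwise_cons.1 h).1 c (by simp)
      by_cases hab : a < b
      · simp [pvInner, hab, not_lt.2 hcb]
      · simp [pvInner, hab]

-- main invariant: A's state is (n, Bs.drop n)
lemma pv_main (Bs : List Int) (hs : Bs.Pairwise (fun x y => y ≤ x)) :
    ∀ (As : List Int) (n : Nat),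
      (As.foldl pvStepA ((n : Int), Bs.drop n)).1 = As.foldl (pvStepB Bs) (n : Int) := by
  intro As
  induction As with
  | nil => intro n; simp
  | cons a rest ih =>
      intro n
      by_cases hlen : n < Bs.length
      · set b := Bs[n]'hlen with hbdef
        have hdrop : Bs.drop n = b :: Bs.drop (n + 1) := List.drop_eq_getElem_cons hlen
        have hsd : (Bs.drop n).Pairwise (fun x y => y ≤ x) := hs.drop
        have hinner : pvInner a (Bs.drop n) = if a < b then b else a := by
          rw [hdrop]; exact pvInner_sorted a b _ (hdrop ▸ hsd)
        have hget : PySem.List.pyGet? Bs (n : Int) = some b := by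
          simp [PySem.List.pyGet?, PySem.List.pyIdx?, hlen, hbdef]
        by_cases hab : a < b
        · have hinner' : pvInner a (b :: Bs.drop (n + 1)) = b := by
            rw [← hdrop, hinner, if_pos hab]
          have hA : pvStepA ((n : Int), Bs.drop n) a = ((n : Int) + 1, Bs.drop (n + 1)) := by
            have hne : ¬ b = a := by omega
            simp [pvStepA, hdrop, hinner', hne]
          have hB : pvStepB Bs (n : Int) a = (n : Int) + 1 := by
            simp only [pvStepB, hget, Option.getD_some]
            rw [if_pos]; exact ⟨by exact_mod_cast hlen, hab⟩
          rw [List.foldl_cons, List.foldl_cons, hA, hB]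
          have := ih (n + 1)
          push_cast at this ⊢
          exact this
        · have hinner' : pvInner a (Bs.drop n) = a := by rw [hinner, if_neg hab]
          have hA : pvStepA ((n : Int), Bs.drop n) a = ((n : Int), Bs.drop n) := by
            simp [pvStepA, hinner']
          have hB : pvStepB Bs (n : Int) a = (n : Int) := by
            simp only [pvStepB, hget, Option.getD_some]
            rw [if_neg]; exact fun h => hab h.2
          rw [List.foldl_cons, List.foldl_cons, hA, hB]
          exact ih n
      · have hdrop : Bs.drop n = [] := List.drop_eq_nil_of_le (by omega)
        have hA : pvStepA ((n : Int), Bs.drop n) a = ((n : Int), Bs.drop n) := by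
          simp [pvStepA, hdrop, pvInner]
        have hB : pvStepB Bs (n : Int) a = (n : Int) := by
          simp [pvStepB]; intro h; omega
        rw [List.foldl_cons, List.foldl_cons, hA, hB]
        exact ih n

-- ===== VERDICT (by name: the statement is the Claim_ definition above) =====
theorem solution_spec : Claim_equal_solution := by
  intro A B _
  unfold Spec_solution solution solution_alt
  have hs : (PySem.List.sorted B (fun x => x) true).Pairwise (fun x y => y ≤ x) :=
    PySem.List.sorted_pairwise_rev B (fun x => x)
  have := pv_main (PySem.List.sorted B (fun x => x) true) hs
    (PySem.List.sorted A (fun x => x) true) 0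
  simpa using this
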